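-- pv_equiv track=rewrite | github.com/apardawala/ai-navigator | magellan/tools/silver-indexer.py | find_boilerplate
-- ===== SOURCE A (Python) =====
-- from collections import Counter
--
-- def find_boilerplate(lines, threshold=3):
--     """Find lines that repeat 3+ times — likely headers/footers/watermarks."""
--     stripped = [l.strip() for l in lines]
--     counts = Counter(stripped)
--     boilerplate = set()
--     for text, count in counts.items():
--         if count >= threshold and len(text) > 5:
--             boilerplate.add(text)
--     return boilerplate
-- ===== SOURCE B (Python) =====
-- def find_boilerplate(lines, threshold=3):
--     """Partition-based grouping: repeatedly split the remaining lines on the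
--     first value, so each distinct line is judged once with its full count
--     (no hash tally)."""
--     rest = [l.strip() for l in lines]
--     boilerplate = set()
--     while rest:
--         t = rest[0]
--         same = [x for x in rest if x == t]
--         rest = [x for x in rest if x != t]
--         if len(same) >= threshold and len(t) > 5:
--             boilerplate.add(t)
--     return boilerplate
-- ===== Notes on version B (the rewrite author's own statement) =====
-- stated objective: alternative
-- what changed: Replaces the Counter hash tally plus items() loop by a partition-based pass that repeatedly extracts the whole equivalence class of the first remaining line, judging each distinct line once with its full count.
import Mathlib
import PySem

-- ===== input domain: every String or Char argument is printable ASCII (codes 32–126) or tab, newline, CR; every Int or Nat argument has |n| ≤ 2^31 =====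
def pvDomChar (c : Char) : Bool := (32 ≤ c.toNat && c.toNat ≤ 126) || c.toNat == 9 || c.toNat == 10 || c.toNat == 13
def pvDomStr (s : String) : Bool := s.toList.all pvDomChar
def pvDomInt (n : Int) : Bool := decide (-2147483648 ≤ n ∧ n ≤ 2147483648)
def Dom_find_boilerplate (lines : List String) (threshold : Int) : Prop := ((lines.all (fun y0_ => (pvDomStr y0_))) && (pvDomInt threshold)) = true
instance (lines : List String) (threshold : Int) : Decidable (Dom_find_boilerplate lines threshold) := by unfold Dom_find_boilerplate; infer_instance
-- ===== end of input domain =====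

-- B drops the Counter tally: it repeatedly partitions the remaining lines on the
-- first value, judging each distinct line once with its full count (alternative
-- decomposition, not faster).

-- ===== PORT A =====
def find_boilerplate (lines : List String) (threshold : Int) : List String :=
  let stripped := lines.map PySem.Str.strip
  let counts := PySem.Dict.counter stripped
  counts.items.foldl
    (fun bp tc =>
      if tc.2 ≥ threshold ∧ PySem.Str.len tc.1 > 5 then PySem.Set.add bp tc.1 else bp)
    PySem.Set.empty

-- ===== PORT B =====
-- the while-loop of Source B: extract the first value's whole equivalence class each round
def pvPartitionLoop (threshold : Int) (bp : PySem.Set String) (rest : List String) :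
    PySem.Set String :=
  match rest with
  | [] => bp
  | t :: tl =>
      let same := (t :: tl).filter (fun x => x == t)
      let rest' := (t :: tl).filter (fun x => x != t)
      pvPartitionLoop threshold
        (if (same.length : Int) ≥ threshold ∧ PySem.Str.len t > 5
         then PySem.Set.add bp t else bp)
        rest'
  termination_by rest.length
  decreasing_by
    simp only [List.filter_cons, bne_self_eq_false]
    exact Nat.lt_succ_of_le (List.length_filter_le _ tl)

def find_boilerplate_alt (lines : List String) (threshold : Int) : List String :=
  pvPartitionLoop threshold PySem.Set.empty (lines.map PySem.Str.strip)

-- ===== PRECONDITION & SPEC =====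
def Spec_find_boilerplate (lines : List String) (threshold : Int) (out : List String) : Prop := out = find_boilerplate_alt lines threshold
instance (lines : List String) (threshold : Int) (out : List String) : Decidable (Spec_find_boilerplate lines threshold out) := by unfold Spec_find_boilerplate; infer_instance

-- ===== CLAIM =====
def Claim_equal_find_boilerplate : Prop := ∀ (lines : List String) (threshold : Int), Dom_find_boilerplate lines threshold → Spec_find_boilerplate lines threshold (find_boilerplate lines threshold)

-- ===== LEMMAS AND PROOFS =====

-- A's loop over the distinct keys: add-if-p over a Nodup list is filter.
theorem foldA_eq_filter (p : String → Prop) [DecidablePred p] (ks : List String)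
    (hnd : ks.Nodup) :
    ks.foldl (fun bp k => if p k then PySem.Set.add bp k else bp) PySem.Set.empty
      = ks.filter (fun k => decide (p k)) := by
  induction ks using List.reverseRecOn with
  | nil => rfl
  | append_singleton l x ih =>
    rw [List.nodup_append] at hnd
    obtain ⟨hnd', -, hdisj⟩ := hnd
    have hx : x ∉ l := fun h => hdisj x h x (List.mem_singleton_self x) rfl
    rw [List.foldl_append, List.filter_append, ih hnd']
    by_cases hp : p x
    · have hxf : x ∉ l.filter (fun k => decide (p k)) := fun h => hx (List.mem_of_mem_filter h)
      simp [hp, PySem.Set.add_of_not_mem hxf]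
    · simp [hp]

theorem discard_eq_filter (s : List String) (x : String) :
    PySem.Set.discard s x = s.filter (fun y => y != x) := by
  simp [PySem.Set.discard, bne]

-- set(l) commutes with removing one value
theorem ofList_filter_ne (t : String) (l : List String) :
    PySem.Set.ofList (l.filter (fun x => x != t))
      = (PySem.Set.ofList l).filter (fun x => x != t) := by
  induction l with
  | nil => rfl
  | cons x xs ih =>
    by_cases hx : x = t
    · subst hx
      simp [PySem.Set.ofList_cons, discard_eq_filter,
        List.filter_filter, ih]
    · have hxt : (x != t) = true := by simp [hx]
      simp only [List.filter_cons, hxt, if_pos, PySem.Set.ofList_cons, ih,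
        discard_eq_filter, List.filter_filter]
      congr 1
      simp [Bool.and_comm]

-- the partition pass collects, in first-occurrence order, the distinct elements
-- passing the count/length test with their FULL counts
theorem partition_eq (threshold : Int) (n : Nat) (l : List String)
    (bp : PySem.Set String) (hlen : l.length ≤ n) (hdisj : ∀ x ∈ l, x ∉ bp) :
    pvPartitionLoop threshold bp l
      = bp ++ (PySem.Set.ofList l).filter
          (fun t => decide ((l.count t : Int) ≥ threshold) && decide (PySem.Str.len t > 5)) := by
  induction n generalizing l bp with
  | zero =>
    have : l = [] := List.eq_nil_of_length_eq_zero (Nat.le_zero.mp hlen)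
    subst this; simp [pvPartitionLoop]
  | succ n ih =>
    match l with
    | [] => simp [pvPartitionLoop]
    | t :: tl =>
      rw [pvPartitionLoop]
      have hrest : (t :: tl).filter (fun x => x != t) = tl.filter (fun x => x != t) := by
        simp
      have hlen' : (tl.filter (fun x => x != t)).length ≤ n := by
        have := List.length_filter_le (fun x => x != t) tl
        simp only [List.length_cons, Nat.succ_le_succ_iff] at hlen
        omega
      have htbp : t ∉ bp := hdisj t (List.mem_cons_self)
      set bp' := (if ((((t :: tl).filter (fun x => x == t)).length : Int) ≥ threshold
          ∧ PySem.Str.len t > 5) then PySem.Set.add bp t else bp) with hbp'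
      have hdisj' : ∀ x ∈ tl.filter (fun x => x != t), x ∉ bp' := by
        intro x hxm
        have hxt : x ≠ t := by
          have := (List.mem_filter.mp hxm).2; simpa using this
        have hxl : x ∉ bp := hdisj x (List.mem_cons_of_mem _ (List.mem_of_mem_filter hxm))
        rw [hbp']
        split
        · rw [PySem.Set.add_of_not_mem htbp]
          simp [hxl, hxt]
        · exact hxl
      rw [hrest, ih _ _ hlen' hdisj']
      -- rewrite set and counts of the filtered tail
      have hof : PySem.Set.ofList (tl.filter (fun x => x != t))
          = (PySem.Set.ofList tl).filter (fun x => x != t) := ofList_filter_ne t tl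
      have hofl : PySem.Set.ofList (t :: tl)
          = t :: (PySem.Set.ofList tl).filter (fun x => x != t) := by
        rw [PySem.Set.ofList_cons, discard_eq_filter]
      rw [hof, hofl]
      have hcntt : (t :: tl).count t = ((t :: tl).filter (fun x => x == t)).length :=
        List.count_eq_length_filter ..
      have hcong : ((PySem.Set.ofList tl).filter (fun x => x != t)).filter
            (fun s => decide (((tl.filter (fun x => x != t)).count s : Int) ≥ threshold)
              && decide (PySem.Str.len s > 5))
          = ((PySem.Set.ofList tl).filter (fun x => x != t)).filter
            (fun s => decide ((((t :: tl).count s : Int)) ≥ threshold)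
              && decide (PySem.Str.len s > 5)) := by
        apply List.filter_congr
        intro s hs
        have hst : s ≠ t := by
          have := (List.mem_filter.mp hs).2; simpa using this
        rw [List.count_filter (by simp [hst]), List.count_cons, if_neg (by simp [Ne.symm hst])]
        simp
      rw [hcong]
      by_cases hc : ((((t :: tl).filter (fun x => x == t)).length : Int) ≥ threshold
          ∧ PySem.Str.len t > 5)
      · have hpt : (decide (((t :: tl).count t : Int) ≥ threshold)
            && decide (PySem.Str.len t > 5)) = true := by
          rw [hcntt]
          simp only [Bool.and_eq_true, decide_eq_true_eq]
          exact ⟨hc.1, hc.2⟩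
        rw [hbp', if_pos hc, PySem.Set.add_of_not_mem htbp]
        simp only [List.filter_cons, hpt, if_true]
        simp
      · have hpt : (decide (((t :: tl).count t : Int) ≥ threshold)
            && decide (PySem.Str.len t > 5)) = false := by
          rw [hcntt]
          simp only [Bool.and_eq_false_iff, decide_eq_false_iff_not]
          exact (not_and_or.mp hc).imp id id
        simp only [List.filter_cons, hpt]
        rw [hbp', if_neg hc]
        simp

theorem ports_agree (lines : List String) (threshold : Int) :
    find_boilerplate lines threshold = find_boilerplate_alt lines threshold := by
  unfold find_boilerplate find_boilerplate_alt
  dsimp only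
  set stripped := lines.map PySem.Str.strip with hs
  rw [PySem.Dict.items_counter, List.foldl_map]
  rw [foldA_eq_filter (fun k => ((stripped.count k : Int) ≥ threshold ∧ PySem.Str.len k > 5))
        (PySem.Set.ofList stripped) (PySem.Set.nodup_ofList stripped)]
  rw [partition_eq threshold stripped.length stripped PySem.Set.empty le_rfl
        (by intro x _ h; simp [PySem.Set.empty] at h)]
  show _ = [] ++ _
  rw [List.nil_append]
  apply List.filter_congr
  intro t _
  simp [Bool.decide_and]

-- ===== VERDICT =====
theorem find_boilerplate_spec : Claim_equal_find_boilerplate := by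
  intro lines threshold _
  unfold Spec_find_boilerplate
  exact ports_agree lines threshold
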